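-- pv_equiv track=rewrite | github.com/br0x/zeliard | tools/MDTViewer/tile_graphics.py | _decode4
-- ===== SOURCE A (Python) =====
-- def _rol16(w, n=1):
--     w &= 0xFFFF
--     c  = 0
--     for _ in range(n):
--         c = (w>>15)&1
--         w = ((w<<1)|c)&0xFFFF
--     return w, c
--
-- def _decode4(p1, p2, p3):
--     pxs = []
--     for _ in range(4):
--         ax = 0
--         p3,c=_rol16(p3); ax=(ax<<1)|c
--         p2,c=_rol16(p2); ax=(ax<<1)|c
--         p1,c=_rol16(p1); ax=(ax<<1)|c
--         p3,c=_rol16(p3); ax=(ax<<1)|c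
--         p2,c=_rol16(p2); ax=(ax<<1)|c
--         p1,c=_rol16(p1); ax=(ax<<1)|c
--         pxs.append(ax & 0x3F)
--     return p1, p2, p3, pxs
-- ===== SOURCE B (Python) =====
-- def _bit(w, k):
--     return (w >> k) & 1
--
-- def _decode4(p1, p2, p3):
--     # Direct bit extraction instead of iterated rotate-and-carry.
--     p1 &= 0xFFFF; p2 &= 0xFFFF; p3 &= 0xFFFF
--     pxs = []
--     for i in range(4):
--         s = 15 - 2*i
--         ax = ((_bit(p3, s)   << 5) | (_bit(p2, s)   << 4) | (_bit(p1, s)   << 3) |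
--               (_bit(p3, s-1) << 2) | (_bit(p2, s-1) << 1) |  _bit(p1, s-1))
--         pxs.append(ax)
--     rot = ((p1 << 8) | (p1 >> 8)) & 0xFFFF, ((p2 << 8) | (p2 >> 8)) & 0xFFFF, ((p3 << 8) | (p3 >> 8)) & 0xFFFF
--     return rot[0], rot[1], rot[2], pxs
-- ===== Notes on version B (the rewrite author's own statement) =====
-- stated objective: simpler
-- what changed: Replaced the 24 iterated rotate-left-with-carry steps by direct indexed bit extraction for each of the 4 pixels plus a closed-form rotate-by-8 of the three masked words.
import Mathlib
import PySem

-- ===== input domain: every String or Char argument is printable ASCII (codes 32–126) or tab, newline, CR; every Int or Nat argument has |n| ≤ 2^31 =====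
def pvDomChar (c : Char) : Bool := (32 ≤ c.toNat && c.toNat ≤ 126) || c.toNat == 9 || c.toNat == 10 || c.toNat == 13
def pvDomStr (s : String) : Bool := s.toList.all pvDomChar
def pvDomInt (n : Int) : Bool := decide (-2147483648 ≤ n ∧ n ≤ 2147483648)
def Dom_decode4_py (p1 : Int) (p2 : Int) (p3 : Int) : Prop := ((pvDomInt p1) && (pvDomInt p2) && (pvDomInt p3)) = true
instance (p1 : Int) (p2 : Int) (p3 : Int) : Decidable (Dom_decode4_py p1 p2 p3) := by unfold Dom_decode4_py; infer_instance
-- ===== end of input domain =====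

-- B replaces A's 24 iterated rotate-left-with-carry steps by direct indexed bit
-- extraction per pixel plus a closed-form rotate-by-8 of the words (objective: simpler).

-- ===== PORT A =====
-- _rol16(w, n): `w &= 0xFFFF` on a Python int is exactly `w % 65536` (Lean Int `%` is
-- Euclidean mod, which for a positive modulus equals Python's `%` and hence the mask);
-- inside the loop w is a nonnegative 16-bit value, so `(w>>15)&1` is `w / 32768 % 2`
-- and `((w<<1)|c)&0xFFFF` is `(w*2+c) % 65536` (the low bit of w<<1 is 0, so | = +).
def rol16A (w : Int) (n : Nat) : Int × Int :=
  (List.range n).foldl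
    (fun (wc : Int × Int) _ =>
      let c := wc.1 / 32768 % 2
      ((wc.1 * 2 + c) % 65536, c))
    (w % 65536, 0)

def decode4_py (p1 : Int) (p2 : Int) (p3 : Int) : Int × Int × Int × List Int :=
  -- the `for _ in range(4)` loop over the state (p1, p2, p3, pxs); `(ax<<1)|c` is
  -- `ax*2+c` (c ∈ {0,1}, low bit of ax<<1 is 0); `ax & 0x3F` on 0 ≤ ax is `ax % 64`
  (List.range 4).foldl
    (fun (s : Int × Int × Int × List Int) _ =>
      let r1 := rol16A s.2.2.1 1
      let r2 := rol16A s.2.1 1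
      let r3 := rol16A s.1 1
      let r4 := rol16A r1.1 1
      let r5 := rol16A r2.1 1
      let r6 := rol16A r3.1 1
      let ax := ((((r1.2 * 2 + r2.2) * 2 + r3.2) * 2 + r4.2) * 2 + r5.2) * 2 + r6.2
      (r6.1, r5.1, r4.1, s.2.2.2 ++ [ax % 64]))
    (p1, p2, p3, [])

-- ===== PORT B =====
-- `(w >> k) & 1` on nonnegative w is `w / 2^k % 2` (exact)
def bitB (w : Int) (k : Nat) : Int := w / ((2 : Int) ^ k) % 2

-- `((w<<8)|(w>>8)) & 0xFFFF` on a 16-bit w: the two operands occupy disjoint bits, so | = +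
def rot8B (w : Int) : Int := (w * 256 + w / 256) % 65536

def decode4_py_alt (p1 : Int) (p2 : Int) (p3 : Int) : Int × Int × Int × List Int :=
  let q1 := p1 % 65536   -- p1 &= 0xFFFF
  let q2 := p2 % 65536
  let q3 := p3 % 65536
  let pxs := (List.range 4).map (fun i =>
    let s := 15 - 2 * i
    bitB q3 s * 32 + bitB q2 s * 16 + bitB q1 s * 8 +
      bitB q3 (s - 1) * 4 + bitB q2 (s - 1) * 2 + bitB q1 (s - 1))
  (rot8B q1, rot8B q2, rot8B q3, pxs)

-- ===== PRECONDITION & SPEC =====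
def Spec_decode4_py (p1 : Int) (p2 : Int) (p3 : Int) (out : Int × Int × Int × List Int) : Prop := out = decode4_py_alt p1 p2 p3
instance (p1 : Int) (p2 : Int) (p3 : Int) (out : Int × Int × Int × List Int) : Decidable (Spec_decode4_py p1 p2 p3 out) := by unfold Spec_decode4_py; infer_instance

-- ===== CLAIM (what is proved, stated in full; the proofs are below) =====
def Claim_equal_decode4_py : Prop := ∀ (p1 : Int) (p2 : Int) (p3 : Int), Dom_decode4_py p1 p2 p3 → Spec_decode4_py p1 p2 p3 (decode4_py p1 p2 p3)

-- ===== LEMMAS AND PROOFS =====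

-- one rotation of A, written without the inner `% 2` (for omega-friendliness)
theorem rol16A_one (w : Int) : rol16A w 1 =
    ((w % 65536 % 32768) * 2 + w % 65536 / 32768, w % 65536 / 32768) := by
  simp only [rol16A, List.range_succ, List.range_zero, List.nil_append,
    List.foldl_cons, List.foldl_nil]
  have h2 : w % 65536 / 32768 % 2 = w % 65536 / 32768 := by omega
  rw [h2]
  refine Prod.ext ?_ ?_
  · simp; omega
  · rfl

theorem step1 (w : Int) (h0 : 0 ≤ w) (h1 : w < 65536) :
    rol16A (w) 1 = (w % 32768 * 2 + w / 32768, w / 32768 % 2) := by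
  rw [rol16A_one]
  have hm : (w) % 65536 = w := by omega
  rw [hm]
  refine Prod.ext ?_ ?_ <;> simp <;> omega

theorem step2 (w : Int) (h0 : 0 ≤ w) (h1 : w < 65536) :
    rol16A (w % 32768 * 2 + w / 32768) 1 = (w % 16384 * 4 + w / 16384, w / 16384 % 2) := by
  rw [rol16A_one]
  have hm : (w % 32768 * 2 + w / 32768) % 65536 = w % 32768 * 2 + w / 32768 := by omega
  rw [hm]
  have hdd : w / 16384 / 2 = w / 32768 := by
    rw [Int.ediv_ediv_of_nonneg (by norm_num : (0:Int) ≤ 16384)]; norm_num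
  refine Prod.ext ?_ ?_ <;> simp <;> omega

theorem step3 (w : Int) (h0 : 0 ≤ w) (h1 : w < 65536) :
    rol16A (w % 16384 * 4 + w / 16384) 1 = (w % 8192 * 8 + w / 8192, w / 8192 % 2) := by
  rw [rol16A_one]
  have hm : (w % 16384 * 4 + w / 16384) % 65536 = w % 16384 * 4 + w / 16384 := by omega
  rw [hm]
  have hdd : w / 8192 / 2 = w / 16384 := by
    rw [Int.ediv_ediv_of_nonneg (by norm_num : (0:Int) ≤ 8192)]; norm_num
  refine Prod.ext ?_ ?_ <;> simp <;> omega

theorem step4 (w : Int) (h0 : 0 ≤ w) (h1 : w < 65536) :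
    rol16A (w % 8192 * 8 + w / 8192) 1 = (w % 4096 * 16 + w / 4096, w / 4096 % 2) := by
  rw [rol16A_one]
  have hm : (w % 8192 * 8 + w / 8192) % 65536 = w % 8192 * 8 + w / 8192 := by omega
  rw [hm]
  have hdd : w / 4096 / 2 = w / 8192 := by
    rw [Int.ediv_ediv_of_nonneg (by norm_num : (0:Int) ≤ 4096)]; norm_num
  refine Prod.ext ?_ ?_ <;> simp <;> omega

theorem step5 (w : Int) (h0 : 0 ≤ w) (h1 : w < 65536) :
    rol16A (w % 4096 * 16 + w / 4096) 1 = (w % 2048 * 32 + w / 2048, w / 2048 % 2) := by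
  rw [rol16A_one]
  have hm : (w % 4096 * 16 + w / 4096) % 65536 = w % 4096 * 16 + w / 4096 := by omega
  rw [hm]
  have hdd : w / 2048 / 2 = w / 4096 := by
    rw [Int.ediv_ediv_of_nonneg (by norm_num : (0:Int) ≤ 2048)]; norm_num
  refine Prod.ext ?_ ?_ <;> simp <;> omega

theorem step6 (w : Int) (h0 : 0 ≤ w) (h1 : w < 65536) :
    rol16A (w % 2048 * 32 + w / 2048) 1 = (w % 1024 * 64 + w / 1024, w / 1024 % 2) := by
  rw [rol16A_one]
  have hm : (w % 2048 * 32 + w / 2048) % 65536 = w % 2048 * 32 + w / 2048 := by omega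
  rw [hm]
  have hdd : w / 1024 / 2 = w / 2048 := by
    rw [Int.ediv_ediv_of_nonneg (by norm_num : (0:Int) ≤ 1024)]; norm_num
  refine Prod.ext ?_ ?_ <;> simp <;> omega

theorem step7 (w : Int) (h0 : 0 ≤ w) (h1 : w < 65536) :
    rol16A (w % 1024 * 64 + w / 1024) 1 = (w % 512 * 128 + w / 512, w / 512 % 2) := by
  rw [rol16A_one]
  have hm : (w % 1024 * 64 + w / 1024) % 65536 = w % 1024 * 64 + w / 1024 := by omega
  rw [hm]
  have hdd : w / 512 / 2 = w / 1024 := by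
    rw [Int.ediv_ediv_of_nonneg (by norm_num : (0:Int) ≤ 512)]; norm_num
  refine Prod.ext ?_ ?_ <;> simp <;> omega

theorem step8 (w : Int) (h0 : 0 ≤ w) (h1 : w < 65536) :
    rol16A (w % 512 * 128 + w / 512) 1 = (w % 256 * 256 + w / 256, w / 256 % 2) := by
  rw [rol16A_one]
  have hm : (w % 512 * 128 + w / 512) % 65536 = w % 512 * 128 + w / 512 := by omega
  rw [hm]
  have hdd : w / 256 / 2 = w / 512 := by
    rw [Int.ediv_ediv_of_nonneg (by norm_num : (0:Int) ≤ 256)]; norm_num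
  refine Prod.ext ?_ ?_ <;> simp <;> omega

theorem decode4_core (a b c : Int)
    (ha0 : 0 ≤ a) (ha1 : a < 65536) (hb0 : 0 ≤ b) (hb1 : b < 65536)
    (hc0 : 0 ≤ c) (hc1 : c < 65536) :
    decode4_py a b c = decode4_py_alt a b c := by
  simp only [decode4_py, decode4_py_alt, List.range_succ, List.range_zero,
    List.nil_append, List.foldl_cons, List.foldl_nil,
    List.map_cons, List.map_nil, List.cons_append,
    step1 a ha0 ha1, step2 a ha0 ha1, step3 a ha0 ha1, step4 a ha0 ha1,
    step5 a ha0 ha1, step6 a ha0 ha1, step7 a ha0 ha1, step8 a ha0 ha1,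
    step1 b hb0 hb1, step2 b hb0 hb1, step3 b hb0 hb1, step4 b hb0 hb1,
    step5 b hb0 hb1, step6 b hb0 hb1, step7 b hb0 hb1, step8 b hb0 hb1,
    step1 c hc0 hc1, step2 c hc0 hc1, step3 c hc0 hc1, step4 c hc0 hc1,
    step5 c hc0 hc1, step6 c hc0 hc1, step7 c hc0 hc1, step8 c hc0 hc1,
    bitB, rot8B]
  norm_num
  have ea : a % 65536 = a := by omega
  have eb : b % 65536 = b := by omega
  have ec : c % 65536 = c := by omega
  rw [ea, eb, ec]
  refine ⟨by omega, by omega, by omega, by omega, by omega, by omega, by omega⟩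

theorem masked_eq (p1 p2 p3 : Int) :
    decode4_py p1 p2 p3 = decode4_py (p1 % 65536) (p2 % 65536) (p3 % 65536) ∧
    decode4_py_alt p1 p2 p3 = decode4_py_alt (p1 % 65536) (p2 % 65536) (p3 % 65536) := by
  constructor
  · simp only [decode4_py, rol16A, List.range_succ, List.range_zero, List.nil_append,
      List.foldl_append, List.foldl_cons, List.foldl_nil,
      Int.emod_emod_of_dvd _ dvd_rfl]
  · simp only [decode4_py_alt, Int.emod_emod_of_dvd _ dvd_rfl]

-- ===== VERDICT (by name: the statement is the Claim_ definition above) =====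
theorem decode4_py_spec : Claim_equal_decode4_py := by
  intro p1 p2 p3 _
  unfold Spec_decode4_py
  rcases masked_eq p1 p2 p3 with ⟨hA, hB⟩
  rw [hA, hB]
  exact decode4_core _ _ _
    (Int.emod_nonneg _ (by norm_num)) (Int.emod_lt_of_pos _ (by norm_num))
    (Int.emod_nonneg _ (by norm_num)) (Int.emod_lt_of_pos _ (by norm_num))
    (Int.emod_nonneg _ (by norm_num)) (Int.emod_lt_of_pos _ (by norm_num))
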